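-- pv_equiv track=rewrite | github.com/jshilkova/advent_of_code | 15/15.2.py | process_lens
-- ===== SOURCE A (Python) =====
-- def get_hash(string):
--     val = 0
--     for ch in string:
--         val += ord(ch)
--         val *= 17
--         val = val % 256
--     return val
--
-- def process_lens(string, boxes, indexes):
--     if '-' in string:
--         label = string[:-1]
--         box = get_hash(label)
--         if label in indexes[box]:
--             removed_lens_index = indexes[box][label]
--             del boxes[box][removed_lens_index]
--             del indexes[box][label]
--             for k, v in indexes[box].items():
--                 if v > removed_lens_index:
--                     indexes[box][k] = v - 1
--     elif '=' in string:
--         label = string[:-2]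
--         box = get_hash(label)
--         focal_length = string.split('=')[1]
--         if label in indexes[box]:
--             boxes[box][indexes[box][label]] = [label, focal_length]
--         else:
--             boxes[box].append([label, focal_length])
--             indexes[box][label] = boxes[box].index([label, focal_length])
--     return boxes
-- ===== SOURCE B (Python) =====
-- # B: functional re-implementation — computes the updated box as a fresh list and
-- # splices it into a new outer list (no in-place mutation of `boxes`/`indexes`;
-- # equivalence with A is about the returned value).
--
-- def get_hash(string):
--     val = 0
--     for ch in string:
--         val = (val + ord(ch)) * 17 % 256
--     return val
--
-- def process_lens(string, boxes, indexes):
--     if '-' in string: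
--         label = string[:-1]
--         box = get_hash(label)
--         pos = indexes[box].get(label)
--         if pos is None:
--             return boxes
--         new_box = list(boxes[box])
--         del new_box[pos]
--     elif '=' in string:
--         label = string[:-2]
--         box = get_hash(label)
--         entry = [label, string.split('=')[1]]
--         pos = indexes[box].get(label)
--         new_box = list(boxes[box])
--         if pos is None:
--             new_box.append(entry)
--         else:
--             new_box[pos] = entry
--     else:
--         return boxes
--     return boxes[:box] + [new_box] + boxes[box + 1:]
-- ===== Notes on version B (the rewrite author's own statement) =====
-- stated objective: simpler
-- what changed: B is purely functional: it computes the single affected box as a fresh list (delete/replace/append) and splices it into a new outer list, dropping A's in-place mutation and all of A's incremental index-map bookkeeping (the del + conditional-decrement loop and the .index call), which cannot affect the returned boxes.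
import Mathlib
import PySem

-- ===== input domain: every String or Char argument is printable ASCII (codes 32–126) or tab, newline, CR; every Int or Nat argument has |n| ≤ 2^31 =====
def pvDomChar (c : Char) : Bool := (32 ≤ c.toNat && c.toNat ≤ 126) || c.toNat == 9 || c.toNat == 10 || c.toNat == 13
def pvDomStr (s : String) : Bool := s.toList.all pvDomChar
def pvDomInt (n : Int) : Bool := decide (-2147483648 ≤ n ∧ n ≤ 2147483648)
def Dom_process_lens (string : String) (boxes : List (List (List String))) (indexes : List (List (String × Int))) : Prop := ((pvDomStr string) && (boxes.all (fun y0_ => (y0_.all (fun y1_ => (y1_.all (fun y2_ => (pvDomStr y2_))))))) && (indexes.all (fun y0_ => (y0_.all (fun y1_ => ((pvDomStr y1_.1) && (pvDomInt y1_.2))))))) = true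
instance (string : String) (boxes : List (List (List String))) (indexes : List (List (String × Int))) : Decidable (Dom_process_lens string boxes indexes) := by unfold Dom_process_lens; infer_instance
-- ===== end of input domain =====

set_option maxHeartbeats 1000000


-- B is a functional re-implementation: it computes the one updated box as a fresh list and
-- splices it into a new outer list, dropping A's incremental index-map maintenance;
-- A mutates `boxes`/`indexes` in place, B mutates nothing — the equivalence proved here is about the RETURN value.

-- ===== PORT A =====
def get_hash (s : String) : Int :=
  s.toList.foldl (fun val ch => PySem.Int.mod ((val + (ch.toNat : Int)) * 17) 256) 0

def process_lens (string : String) (boxes : List (List (List String))) (indexes : List (List (String × Int))) : List (List (List String)) :=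
  if PySem.Str.isIn "-" string = true then
    let label := PySem.Str.slice string none (some (-1))
    let box := get_hash label
    match (PySem.Dict.mk (PySem.List.pyGetD indexes box [])).get? label with
    | some removed_lens_index =>
        -- del boxes[box][removed_lens_index]   (Pre_ guarantees the index is in range)
        let bx := PySem.List.pyGetD boxes box []
        let bx' := match PySem.List.pop? bx removed_lens_index with
                   | some r => r.2
                   | none => bx
        -- del indexes[box][label]; decrement loop — mutates only `indexes`, which is not returned
        let d0 := (PySem.Dict.mk (PySem.List.pyGetD indexes box [])).erase label
        let _indexes' := PySem.List.pySetD indexes box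
          (d0.items.foldl (fun d kv => if kv.2 > removed_lens_index then d.insert kv.1 (kv.2 - 1) else d) d0).items
        PySem.List.pySetD boxes box bx'
    | none => boxes
  else if PySem.Str.isIn "=" string = true then
    let label := PySem.Str.slice string none (some (-2))
    let box := get_hash label
    let focal_length := PySem.List.pyGetD ((PySem.Str.split? string "=").getD []) 1 ""
    match (PySem.Dict.mk (PySem.List.pyGetD indexes box [])).get? label with
    | some i =>
        -- boxes[box][indexes[box][label]] = [label, focal_length]
        PySem.List.pySetD boxes box (PySem.List.pySetD (PySem.List.pyGetD boxes box []) i [label, focal_length])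
    | none =>
        let bx' := PySem.List.pyGetD boxes box [] ++ [[label, focal_length]]
        -- indexes[box][label] = boxes[box].index(...) — mutates only `indexes`, which is not returned
        let _indexes' := PySem.List.pySetD indexes box
          ((PySem.Dict.mk (PySem.List.pyGetD indexes box [])).insert label
            (((PySem.List.index? bx' [label, focal_length]).getD 0 : Int))).items
        PySem.List.pySetD boxes box bx'
  else boxes

-- ===== PORT B =====
def get_hash_alt (s : String) : Int :=
  s.toList.foldl (fun h ch => PySem.Int.mod ((h + (ch.toNat : Int)) * 17) 256) 0

def process_lens_alt (string : String) (boxes : List (List (List String))) (indexes : List (List (String × Int))) : List (List (List String)) :=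
  if PySem.Str.isIn "-" string = true then
    let label := PySem.Str.slice string none (some (-1))
    let box := get_hash_alt label
    match (PySem.Dict.mk (PySem.List.pyGetD indexes box [])).get? label with
    | none => boxes
    | some pos =>
        let new_box := match PySem.List.pop? (PySem.List.pyGetD boxes box []) pos with
                       | some r => r.2
                       | none => PySem.List.pyGetD boxes box []
        PySem.List.slice boxes none (some box) ++ [new_box] ++ PySem.List.slice boxes (some (box + 1)) none
  else if PySem.Str.isIn "=" string = true then
    let label := PySem.Str.slice string none (some (-2))
    let box := get_hash_alt label
    let entry := [label, PySem.List.pyGetD ((PySem.Str.split? string "=").getD []) 1 ""]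
    let new_box := match (PySem.Dict.mk (PySem.List.pyGetD indexes box [])).get? label with
                   | none => PySem.List.pyGetD boxes box [] ++ [entry]
                   | some pos => PySem.List.pySetD (PySem.List.pyGetD boxes box []) pos entry
    PySem.List.slice boxes none (some box) ++ [new_box] ++ PySem.List.slice boxes (some (box + 1)) none
  else boxes

-- ===== PRECONDITION & SPEC =====
def pvInRangeB (n : Nat) (i : Int) : Bool := decide (-(n : Int) ≤ i) && decide (i < (n : Int))

-- Pre_ excludes exactly the inputs on which the Python A raises an IndexError:
-- the box number out of range of `indexes`/`boxes`, or a stored lens position out of range of its box.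
def Pre_process_lens (string : String) (boxes : List (List (List String))) (indexes : List (List (String × Int))) : Prop :=
  (if PySem.Str.isIn "-" string = true then
     pvInRangeB indexes.length (get_hash (PySem.Str.slice string none (some (-1)))) &&
       (match (PySem.Dict.mk (PySem.List.pyGetD indexes (get_hash (PySem.Str.slice string none (some (-1)))) [])).get? (PySem.Str.slice string none (some (-1))) with
        | none => true
        | some ri => pvInRangeB boxes.length (get_hash (PySem.Str.slice string none (some (-1)))) && pvInRangeB (PySem.List.pyGetD boxes (get_hash (PySem.Str.slice string none (some (-1)))) []).length ri)
   else if PySem.Str.isIn "=" string = true then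
     pvInRangeB indexes.length (get_hash (PySem.Str.slice string none (some (-2)))) && pvInRangeB boxes.length (get_hash (PySem.Str.slice string none (some (-2)))) &&
       (match (PySem.Dict.mk (PySem.List.pyGetD indexes (get_hash (PySem.Str.slice string none (some (-2)))) [])).get? (PySem.Str.slice string none (some (-2))) with
        | none => true
        | some i => pvInRangeB (PySem.List.pyGetD boxes (get_hash (PySem.Str.slice string none (some (-2)))) []).length i)
   else true) = true
instance (string : String) (boxes : List (List (List String))) (indexes : List (List (String × Int))) : Decidable (Pre_process_lens string boxes indexes) := by unfold Pre_process_lens; infer_instance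

def pvWitness_process_lens : String × List (List (List String)) × (List (List (String × Int))) :=
  ("-", [[["ab", "1"]]], [[("ab", 0)]])

def Spec_process_lens (string : String) (boxes : List (List (List String))) (indexes : List (List (String × Int))) (out : List (List (List String))) : Prop := out = process_lens_alt string boxes indexes
instance (string : String) (boxes : List (List (List String))) (indexes : List (List (String × Int))) (out : List (List (List String))) : Decidable (Spec_process_lens string boxes indexes out) := by unfold Spec_process_lens; infer_instance

-- ===== CLAIM (what is proved, stated in full; the proofs are below) =====
def Claim_equal_process_lens : Prop := ∀ (string : String) (boxes : List (List (List String))) (indexes : List (List (String × Int))), Dom_process_lens string boxes indexes → Pre_process_lens string boxes indexes → Spec_process_lens string boxes indexes (process_lens string boxes indexes)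

-- ===== LEMMAS AND PROOFS =====

theorem get_hash_alt_eq (s : String) : get_hash_alt s = get_hash s := rfl

theorem foldl_hash_nonneg (l : List Char) (a : Int) (h : 0 ≤ a) :
    0 ≤ l.foldl (fun val ch => PySem.Int.mod ((val + (ch.toNat : Int)) * 17) 256) a := by
  induction l generalizing a with
  | nil => exact h
  | cons c cs ih => exact ih _ (PySem.Int.mod_nonneg _ (by norm_num))

theorem get_hash_nonneg (s : String) : 0 ≤ get_hash s :=
  foldl_hash_nonneg s.toList 0 le_rfl

-- in-place update at a nonnegative in-range index = splice take/[v]/drop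
theorem pySetD_eq_splice {α : Type} (l : List α) (i : Int) (v : α)
    (h0 : 0 ≤ i) (hl : i < (l.length : Int)) :
    PySem.List.pySetD l i v =
      PySem.List.slice l none (some i) ++ [v] ++ PySem.List.slice l (some (i + 1)) none := by
  rw [PySem.List.pySetD_of_nonneg _ _ h0, PySem.List.slice_to _ h0,
      PySem.List.slice_from _ (by omega : (0:Int) ≤ i + 1), List.set_eq_take_append_cons_drop]
  have hti : i.toNat < l.length := by omega
  have hplus : (i + 1).toNat = i.toNat + 1 := by omega
  simp [hti, hplus]

-- ===== VERDICT (by name: the statement is the Claim_ definition above) =====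
theorem process_lens_spec : Claim_equal_process_lens := by
  intro string boxes indexes _hdom hpre
  unfold Spec_process_lens process_lens process_lens_alt
  unfold Pre_process_lens at hpre
  by_cases hminus : PySem.Str.isIn "-" string = true
  · rw [if_pos hminus] at hpre
    simp only [if_pos hminus, get_hash_alt_eq]
    cases hget : (PySem.Dict.mk (PySem.List.pyGetD indexes (get_hash (PySem.Str.slice string none (some (-1)))) [])).get? (PySem.Str.slice string none (some (-1))) with
    | none => rfl
    | some ri =>
        rw [hget] at hpre
        simp only [pvInRangeB, Bool.and_eq_true, decide_eq_true_eq] at hpre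
        exact pySetD_eq_splice boxes _ _ (get_hash_nonneg _) hpre.2.1.2
  · by_cases heq : PySem.Str.isIn "=" string = true
    · rw [if_neg hminus, if_pos heq] at hpre
      simp only [if_neg hminus, if_pos heq, get_hash_alt_eq]
      cases hget : (PySem.Dict.mk (PySem.List.pyGetD indexes (get_hash (PySem.Str.slice string none (some (-2)))) [])).get? (PySem.Str.slice string none (some (-2))) with
      | none =>
          rw [hget] at hpre
          simp only [pvInRangeB, Bool.and_eq_true, decide_eq_true_eq] at hpre
          exact pySetD_eq_splice boxes _ _ (get_hash_nonneg _) hpre.1.2.2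
      | some i =>
          rw [hget] at hpre
          simp only [pvInRangeB, Bool.and_eq_true, decide_eq_true_eq] at hpre
          exact pySetD_eq_splice boxes _ _ (get_hash_nonneg _) hpre.1.2.2
    · rw [if_neg hminus, if_neg hminus, if_neg heq, if_neg heq]
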